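-- pv_equiv track=rewrite | github.com/mrphlip/eternalchampions | psg_chords.py | islast
-- ===== SOURCE A (Python) =====
-- def islast(seq):
-- 	# not sure why this isn't in itertools tbh
-- 	prev = None
-- 	has_prev = False
-- 	for i in seq:
-- 		if has_prev:
-- 			yield prev, False
-- 		prev = i
-- 		has_prev = True
-- 	if has_prev:
-- 		yield prev, True
-- ===== SOURCE B (Python) =====
-- def islast(seq):
-- 	# Materialize the sequence and compare each index against the last index:
-- 	# no held/lookahead element, the flag is a pure index computation.
-- 	items = list(seq)
-- 	last_i = len(items) - 1
-- 	for i, x in enumerate(items):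
-- 		yield x, i == last_i
-- ===== Notes on version B (the rewrite author's own statement) =====
-- stated objective: idiomatic
-- what changed: Instead of A's delayed-yield pass that holds the previous element behind a has_prev flag, B materializes the sequence, computes its length once, and emits each element zipped with the index test i == len-1 via enumerate, so no element is held back and no flag/lookahead exists.
import Mathlib
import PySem

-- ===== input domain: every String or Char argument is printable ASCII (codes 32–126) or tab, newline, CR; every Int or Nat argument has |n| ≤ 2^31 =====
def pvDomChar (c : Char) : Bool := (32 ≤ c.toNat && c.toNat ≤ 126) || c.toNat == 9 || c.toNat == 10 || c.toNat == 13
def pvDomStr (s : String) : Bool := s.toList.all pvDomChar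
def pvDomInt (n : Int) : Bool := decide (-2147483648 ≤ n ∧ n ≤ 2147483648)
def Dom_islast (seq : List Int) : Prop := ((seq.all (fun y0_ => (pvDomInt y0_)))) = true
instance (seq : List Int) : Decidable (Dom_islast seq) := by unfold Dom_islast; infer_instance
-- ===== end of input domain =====

-- B drops A's held-previous-element/flag pass: it takes the length once and pairs each element with the index test i == len-1 (idiomatic, same cost).


-- ===== PORT A =====
-- state = (prev, has_prev, yielded output); 'prev = None' before any assignment is Option Int none
def islastAStep (st : Option Int × Bool × List (Int × Bool)) (i : Int) :
    Option Int × Bool × List (Int × Bool) :=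
  (some i, true, if st.2.1 then st.2.2 ++ [(st.1.getD 0, false)] else st.2.2)

def islast (seq : List Int) : List (Int × Bool) :=
  let st := seq.foldl islastAStep (none, false, [])
  if st.2.1 then st.2.2 ++ [(st.1.getD 0, true)] else st.2.2

-- ===== PORT B =====
-- items = list(seq); last_i = len(items) - 1; yield x, i == last_i for i, x in enumerate(items)
def islast_alt (seq : List Int) : List (Int × Bool) :=
  let lastI : Int := (seq.length : Int) - 1
  (PySem.List.enumerate seq).map (fun p => (p.2, decide (p.1 = lastI)))

-- ===== PRECONDITION & SPEC =====
def Spec_islast (seq : List Int) (out : List (Int × Bool)) : Prop := out = islast_alt seq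
instance (seq : List Int) (out : List (Int × Bool)) : Decidable (Spec_islast seq out) := by unfold Spec_islast; infer_instance

-- ===== CLAIM (what is proved, stated in full; the proofs are below) =====
def Claim_equal_islast : Prop := ∀ (seq : List Int), Dom_islast seq → Spec_islast seq (islast seq)

-- ===== LEMMAS AND PROOFS =====
-- reference form both ports are reduced to
def islastGo (p : Int) (rest : List Int) : List (Int × Bool) :=
  match rest with
  | [] => [(p, true)]
  | i :: t => (p, false) :: islastGo i t

theorem islast_loopA (t : List Int) (p : Int) (acc : List (Int × Bool)) :
    (let st := t.foldl islastAStep (some p, true, acc)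
     if st.2.1 then st.2.2 ++ [(st.1.getD 0, true)] else st.2.2) = acc ++ islastGo p t := by
  induction t generalizing p acc with
  | nil => simp [islastGo]
  | cons i t ih =>
      simp only [List.foldl_cons, islastAStep, islastGo]
      rw [ih]
      simp

theorem islast_loopB (t : List Int) (p : Int) (s : Int) :
    (PySem.List.enumerate (p :: t) s).map
      (fun q => (q.2, decide (q.1 = s + (t.length : Int)))) = islastGo p t := by
  induction t generalizing p s with
  | nil => simp [PySem.List.enumerate_cons, PySem.List.enumerate_nil, islastGo]
  | cons i t ih =>
      have h := ih i (s + 1)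
      simp only [PySem.List.enumerate_cons, List.map_cons, islastGo] at h ⊢
      simp only [List.length_cons]
      push_cast
      rw [show s + ((t.length : Int) + 1) = s + 1 + (t.length : Int) by ring]
      rw [h]
      simp only [List.cons.injEq, Prod.mk.injEq, and_true, true_and,
        decide_eq_false_iff_not]
      omega

-- ===== VERDICT (by name: the statement is the Claim_ definition above) =====
theorem islast_spec : Claim_equal_islast := by
  intro seq _
  unfold Spec_islast islast islast_alt
  cases seq with
  | nil => simp [PySem.List.enumerate_nil]
  | cons p t =>
      simp only [List.foldl_cons, islastAStep, Bool.false_eq_true, if_false]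
      have hA := islast_loopA t p []
      simp only [List.nil_append] at hA
      rw [hA]
      have hB := islast_loopB t p 0
      rw [← hB]
      simp only [List.length_cons]
      congr 1
      funext q
      simp only [Prod.mk.injEq, true_and, decide_eq_decide]
      push_cast
      omega
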